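-- pv_equiv track=rewrite | github.com/superhortiz/Strings-Algorithms-Python3 | data_compression/burrows_wheeler.py | circular_suffix_array
-- ===== SOURCE A (Python) =====
-- def circular_suffix_array(string):
--     """
--     Generates the circular suffix array of a given string using a 3-way radix quicksort.
--
--     Args:
--         string (str): The input string for which to compute the circular suffix array.
--
--     Returns:
--         list: A list of starting indices that represent the lexicographically sorted circular suffixes of the input string.
--     """
--     length = len(string)
--
--     # Initialize the indices list with starting positions of suffixes
--     indices = list(range(length))
--
--     def sort(string, lo, hi, depth, length):
--         """
--         Recursive 3-way radix quicksort to sort the suffixes.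
--
--         Args:
--             string (str): The input string.
--             lo (int): The lower bound of the current partition.
--             hi (int): The upper bound of the current partition.
--             depth (int): The current character depth to consider in sorting.
--             length (int): The length of the input string.
--         """
--         if hi <= lo or depth >= length:
--             return
--
--         less_than, greater_than = lo, hi
--
--         # Select the pivot character, considering circular behavior
--         pivot = string[(indices[lo] + depth) % length]
--
--         i = lo + 1
--
--         while i <= greater_than:
--             t = string[(indices[i] + depth) % length]
--
--             if t < pivot:
--                 # Swap and move less_than and i pointers
--                 indices[less_than], indices[i] = indices[i], indices[less_than]
--                 less_than += 1
--                 i += 1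
--
--             elif t > pivot:
--                 # Swap and move greater_than pointer
--                 indices[greater_than], indices[i] = indices[i], indices[greater_than]
--                 greater_than -= 1
--
--             else:
--                 # Move i pointer if the characters are equal to the pivot
--                 i += 1
--
--         # Recursively sort the three partitions
--         sort(string, lo, less_than - 1, depth, length)
--         sort(string, less_than, greater_than, depth + 1, length)
--         sort(string, greater_than + 1, hi, depth, length)
--
--     # Initial call to the sorting function
--     sort(string, 0, length - 1, 0, length)
--
--     # Return the sorted indices representing the circular suffix array
--     return indices
-- ===== SOURCE B (Python) =====
-- def circular_suffix_array(string):
--     """Circular suffix array via the library sort, keyed by the materialized rotations."""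
--     return sorted(range(len(string)), key=lambda i: string[i:] + string[:i])
-- ===== Notes on version B (the rewrite author's own statement) =====
-- stated objective: simpler
-- what changed: Replaced the hand-written recursive in-place 3-way radix quicksort over rotation start indices by a single stable library sorted() call keyed by the materialized rotation strings.
-- outside the precondition, e.g. on circular_suffix_array('baba'): A returns [1, 3, 2, 0], B returns [1, 3, 0, 2]
import Mathlib
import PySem

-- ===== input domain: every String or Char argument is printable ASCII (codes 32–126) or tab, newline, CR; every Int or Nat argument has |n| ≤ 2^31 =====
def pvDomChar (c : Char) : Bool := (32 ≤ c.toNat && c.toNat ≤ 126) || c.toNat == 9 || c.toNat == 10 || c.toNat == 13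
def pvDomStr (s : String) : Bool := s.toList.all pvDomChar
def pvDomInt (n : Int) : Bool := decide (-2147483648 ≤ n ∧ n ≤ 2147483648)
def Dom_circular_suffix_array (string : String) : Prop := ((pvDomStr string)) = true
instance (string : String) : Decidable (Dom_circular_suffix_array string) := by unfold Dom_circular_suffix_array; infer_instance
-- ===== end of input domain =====

-- B replaces A's hand-written in-place 3-way radix quicksort of rotation start indices by one
-- stable library sorted() call keyed by the materialized rotations (objective: simpler).

-- ===== PORT A =====
-- indices[j]  (exact: every access is at 0 ≤ j < len(indices))
def pvEnt (a : List Int) (j : Nat) : Int := a.getD j 0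
-- indices[p], indices[q] = indices[q], indices[p]
def pvSwap (a : List Int) (p q : Nat) : List Int := (a.set p (pvEnt a q)).set q (pvEnt a p)
-- string[k % length]  (exact: every use has 0 ≤ k and 0 < length)
def pvChr (l : List Char) (k : Int) : Char := l.getD (PySem.Int.mod k (l.length : Int)).toNat default

-- the inner `while i <= greater_than` loop of A's sort; fuel = gt + 1 - i bounds the
-- iteration count exactly (each step raises i or lowers gt), so the fuel guard never fires
def partA (l : List Char) (pivot : Char) (depth : Nat) :
    Nat → List Int → Nat → Nat → Nat → List Int × Nat × Nat
  | 0, a, lt, _i, gt => (a, lt, gt)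
  | fuel+1, a, lt, i, gt =>
    if i ≤ gt then
      if pvChr l (pvEnt a i + (depth : Int)) < pivot then
        partA l pivot depth fuel (pvSwap a lt i) (lt+1) (i+1) gt
      else if pivot < pvChr l (pvEnt a i + (depth : Int)) then
        partA l pivot depth fuel (pvSwap a gt i) lt i (gt-1)
      else
        partA l pivot depth fuel a lt (i+1) gt
    else (a, lt, gt)

-- A's recursive `sort(string, lo, hi, depth, length)`; fuel ≥ (length - depth) + (hi+1-lo)
-- bounds the recursion depth (the sum strictly decreases along every call), never fires
def sortA (l : List Char) : Nat → List Int → Nat → Nat → Nat → List Int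
  | 0, a, _lo, _hi, _depth => a
  | fuel+1, a, lo, hi, depth =>
    if hi ≤ lo ∨ l.length ≤ depth then a
    else
      let pivot := pvChr l (pvEnt a lo + (depth : Int))
      let r := partA l pivot depth (hi - lo) a lo (lo+1) hi
      let a1 := sortA l fuel r.1 lo (r.2.1 - 1) depth
      let a2 := sortA l fuel a1 r.2.1 r.2.2 (depth+1)
      sortA l fuel a2 (r.2.2 + 1) hi depth

def circular_suffix_array (string : String) : List Int :=
  let l := string.toList
  sortA l (2 * l.length + 2) (PySem.List.pyRange 0 (l.length : Int) 1) 0 (l.length - 1) 0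

-- ===== PORT B =====
-- sorted(range(len(string)), key=lambda i: string[i:] + string[:i]); the str key and its
-- comparison are ported on the code-point list side, exact per PySem (Chars.slice, List.Lex order)
def circular_suffix_array_alt (string : String) : List Int :=
  PySem.List.sorted (PySem.List.pyRange 0 (string.toList.length : Int) 1)
    (fun i => PySem.Chars.slice string.toList (some i) none ++
              PySem.Chars.slice string.toList none (some i)) false

-- ===== PRECONDITION & SPEC =====
-- Pre_ excludes strings that equal one of their own nontrivial rotations (periodic strings):
-- there two distinct rotation indices give equal rotations, and the relative order of such tied
-- indices in A's output is an accident of its unstable quicksort (B, stable, keeps index order).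
def Pre_circular_suffix_array (string : String) : Prop :=
  ∀ p, p < string.toList.length → 0 < p →
    string.toList.drop p ++ string.toList.take p ≠ string.toList
instance (string : String) : Decidable (Pre_circular_suffix_array string) := by
  unfold Pre_circular_suffix_array; infer_instance
def pvWitness_circular_suffix_array : String := "ab"

def Spec_circular_suffix_array (string : String) (out : List Int) : Prop :=
  out = circular_suffix_array_alt string
instance (string : String) (out : List Int) : Decidable (Spec_circular_suffix_array string out) := by
  unfold Spec_circular_suffix_array; infer_instance

-- ===== CLAIM (what is proved, stated in full; the proofs are below) =====
def Claim_equal_circular_suffix_array : Prop := ∀ (string : String), Dom_circular_suffix_array string → Pre_circular_suffix_array string → Spec_circular_suffix_array string (circular_suffix_array string)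

-- ===== LEMMAS AND PROOFS =====

-- the character of the rotation starting at x, position d (wrapped), and the rotation itself
def pvC (l : List Char) (x : Int) (d : Nat) : Char := l.getD ((x.toNat + d) % l.length) default
def pvRot (l : List Char) (x : Int) : List Char := l.drop x.toNat ++ l.take x.toNat
def pvAgree (l : List Char) (d : Nat) (x y : Int) : Prop := ∀ e, e < d → pvC l x e = pvC l y e
def pvWin (a : List Int) (lo hi : Nat) : List Int := (a.drop lo).take (hi + 1 - lo)
def pvGood (l : List Char) (a : List Int) : Prop := ∀ x ∈ a, 0 ≤ x ∧ x.toNat < l.length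

theorem pvEnt_eq_getElem (a : List Int) (m : Nat) (h : m < a.length) : pvEnt a m = a[m] := by
  simp [pvEnt, List.getD_eq_getElem?_getD, List.getElem?_eq_getElem h]

theorem pvChr_eq_pvC (l : List Char) (x : Int) (d : Nat) (hn : 0 < l.length) (hx : 0 ≤ x) :
    pvChr l (x + (d : Int)) = pvC l x d := by
  unfold pvChr pvC PySem.Int.mod
  have h3 : ((x + (d : Int)).fmod (l.length : Int)).toNat = (x.toNat + d) % l.length := by
    rw [Int.fmod_eq_emod, if_pos (Or.inl (by positivity)), add_zero]
    have h2 : x + (d : Int) = ((x.toNat + d : Nat) : Int) := by omega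
    rw [h2, ← Int.natCast_emod, Int.toNat_natCast]
  rw [h3]

theorem length_pvSwap (a : List Int) (p q : Nat) : (pvSwap a p q).length = a.length := by
  simp [pvSwap]

theorem pvEnt_pvSwap (a : List Int) (p q m : Nat) (hp : p < a.length) (hq : q < a.length) :
    pvEnt (pvSwap a p q) m = if m = q then pvEnt a p else if m = p then pvEnt a q else pvEnt a m := by
  simp only [pvEnt, pvSwap, List.getD_eq_getElem?_getD, List.getElem?_set, List.length_set]
  by_cases hmq : m = q
  · subst hmq; rw [if_pos rfl, if_pos hq, if_pos rfl]; simp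
  · rw [if_neg (fun h => hmq h.symm), if_neg hmq]
    by_cases hmp : m = p
    · subst hmp; rw [if_pos rfl, if_pos hp, if_pos rfl]; simp
    · rw [if_neg (fun h => hmp h.symm), if_neg hmp]

theorem perm_pvSwap (a : List Int) (p q : Nat) (hp : p < a.length) (hq : q < a.length) :
    (pvSwap a p q).Perm a := by
  have h := Array.swap_perm (xs := a.toArray) (i := p) (j := q) (by simpa) (by simpa)
  rw [Array.perm_iff_toList_perm] at h
  simp [Array.swap] at h
  unfold pvSwap
  rw [pvEnt_eq_getElem _ _ hq, pvEnt_eq_getElem _ _ hp]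
  exact h

theorem mem_pvWin (a : List Int) (lo hi : Nat) (x : Int) :
    x ∈ pvWin a lo hi ↔ ∃ m, lo ≤ m ∧ m ≤ hi ∧ m < a.length ∧ x = pvEnt a m := by
  unfold pvWin
  rw [List.mem_iff_getElem]
  constructor
  · rintro ⟨j, hj, rfl⟩
    rw [List.length_take, List.length_drop] at hj
    refine ⟨lo + j, by omega, by omega, by omega, ?_⟩
    rw [List.getElem_take, List.getElem_drop, pvEnt_eq_getElem _ _ (by omega)]
  · rintro ⟨m, h1, h2, h3, rfl⟩
    refine ⟨m - lo, by rw [List.length_take, List.length_drop]; omega, ?_⟩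
    rw [List.getElem_take, List.getElem_drop, pvEnt_eq_getElem _ _ (by omega)]
    congr 1; omega

theorem pvWin_perm (a a' : List Int) (lo hi : Nat) (hlen : a'.length = a.length)
    (hperm : a'.Perm a) (hout : ∀ m, m < a.length → (m < lo ∨ hi < m) → pvEnt a' m = pvEnt a m) :
    (pvWin a' lo hi).Perm (pvWin a lo hi) := by
  have e1 : a'.take lo = a.take lo := by
    apply List.ext_getElem (by simp [hlen])
    intro i h1 h2
    rw [List.length_take] at h1 h2
    rw [List.getElem_take, List.getElem_take,
      ← pvEnt_eq_getElem _ _ (by omega), ← pvEnt_eq_getElem _ _ (by omega)]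
    exact hout i (by omega) (by omega)
  have e2 : a'.drop (lo + (hi + 1 - lo)) = a.drop (lo + (hi + 1 - lo)) := by
    apply List.ext_getElem (by simp [hlen])
    intro i h1 h2
    rw [List.length_drop] at h1 h2
    rw [List.getElem_drop, List.getElem_drop,
      ← pvEnt_eq_getElem _ _ (by omega), ← pvEnt_eq_getElem _ _ (by omega)]
    exact hout _ (by omega) (by omega)
  have d1 : ∀ b : List Int, b = b.take lo ++ (pvWin b lo hi ++ b.drop (lo + (hi + 1 - lo))) := by
    intro b
    unfold pvWin
    rw [← List.drop_drop, List.take_append_drop, List.take_append_drop]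
  have h := hperm
  rw [d1 a', d1 a, e1, e2, List.perm_append_left_iff, List.perm_append_right_iff] at h
  exact h

theorem length_pvRot (l : List Char) (x : Int) : (pvRot l x).length = l.length := by
  simp [pvRot]; omega

theorem pvRot_getD (l : List Char) (x : Int) (e : Nat) (hx : x.toNat < l.length)
    (he : e < l.length) : (pvRot l x).getD e default = pvC l x e := by
  unfold pvRot pvC
  have hlen : e < (l.drop x.toNat ++ l.take x.toNat).length := by
    simp [List.length_drop, List.length_take]; omega
  rw [List.getD_eq_getElem _ _ hlen, List.getD_eq_getElem _ _ (Nat.mod_lt _ (by omega) : (x.toNat + e) % l.length < l.length)]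
  rw [List.getElem_append]
  split_ifs with h
  · rw [List.getElem_drop]
    have h' : e < l.length - x.toNat := by rw [List.length_drop] at h; exact h
    have : (x.toNat + e) % l.length = x.toNat + e := Nat.mod_eq_of_lt (by omega)
    simp [this]
  · rw [List.getElem_take]
    have h' : ¬ e < l.length - x.toNat := by rw [List.length_drop] at h; exact h
    have : (x.toNat + e) % l.length = e - (l.drop x.toNat).length := by
      rw [List.length_drop, Nat.mod_eq_sub_mod (by omega), Nat.mod_eq_of_lt (by omega)]
      omega
    simp [this]

theorem pvRot_eq_of_agree (l : List Char) (x y : Int) (hx : x.toNat < l.length)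
    (hy : y.toNat < l.length) (h : pvAgree l l.length x y) : pvRot l x = pvRot l y := by
  apply List.ext_getElem (by rw [length_pvRot, length_pvRot])
  intro i h1 h2
  have h1' : i < l.length := by rw [length_pvRot] at h1; exact h1
  have e1 := pvRot_getD l x i hx h1'
  have e2 := pvRot_getD l y i hy h1'
  rw [List.getD_eq_getElem _ _ h1] at e1
  rw [List.getD_eq_getElem _ _ h2] at e2
  rw [e1, e2]
  exact h i h1' 

theorem pvLex_aux (d : Nat) : ∀ (u v : List Char), d < u.length → d < v.length →
    (∀ e, e < d → u.getD e default = v.getD e default) →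
    u.getD d default < v.getD d default → u < v := by
  induction d with
  | zero =>
    intro u v hu hv _ hlt
    match u, v with
    | a :: u', b :: v' =>
      simp only [List.getD_eq_getElem?_getD, List.getElem?_cons_zero, Option.getD_some] at hlt
      exact (List.lt_iff_lex_lt _ _).mpr (List.Lex.rel hlt)
  | succ d ih =>
    intro u v hu hv hag hlt
    match u, v with
    | a :: u', b :: v' =>
      have h0 : a = b := by
        have := hag 0 (Nat.succ_pos d)
        simpa using this
      subst h0
      have hrec : u' < v' := by
        apply ih u' v' (by simpa using hu) (by simpa using hv)
        · intro e he
          have := hag (e + 1) (by omega)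
          simpa using this
        · simpa using hlt
      exact (List.lt_iff_lex_lt _ _).mpr (List.Lex.cons ((List.lt_iff_lex_lt _ _).mp hrec))

theorem pvRot_lt (l : List Char) (x y : Int) (d : Nat) (hd : d < l.length)
    (hx : x.toNat < l.length) (hy : y.toNat < l.length) (hag : pvAgree l d x y)
    (hc : pvC l x d < pvC l y d) : pvRot l x < pvRot l y := by
  apply pvLex_aux d (pvRot l x) (pvRot l y) (by rw [length_pvRot]; omega) (by rw [length_pvRot]; omega)
  · intro e he
    rw [pvRot_getD l x e hx (by omega), pvRot_getD l y e hy (by omega)]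
    exact hag e he
  · rw [pvRot_getD l x d hx hd, pvRot_getD l y d hy hd]
    exact hc

theorem pvRot_inj (l : List Char)
    (hpre : ∀ p, p < l.length → 0 < p → l.drop p ++ l.take p ≠ l)
    (x y : Int) (hx0 : 0 ≤ x) (hx : x.toNat < l.length) (hy0 : 0 ≤ y) (hy : y.toNat < l.length)
    (hne : x ≠ y) : pvRot l x ≠ pvRot l y := by
  have key : ∀ a b : Nat, a < b → b < l.length → l.rotate a ≠ l.rotate b := by
    intro a b hab hb heq
    have h1 : (l.rotate a).rotate (l.length - b) = (l.rotate b).rotate (l.length - b) := by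
      rw [heq]
    rw [List.rotate_rotate, List.rotate_rotate] at h1
    have h2 : b + (l.length - b) = l.length := by omega
    rw [h2, List.rotate_length] at h1
    have hp : 0 < a + (l.length - b) ∧ a + (l.length - b) < l.length := by omega
    have h3 := hpre (a + (l.length - b)) hp.2 hp.1
    rw [← List.rotate_eq_drop_append_take (by omega)] at h3
    exact h3 h1
  have hx' : pvRot l x = l.rotate x.toNat := by
    unfold pvRot; rw [← List.rotate_eq_drop_append_take (by omega)]
  have hy' : pvRot l y = l.rotate y.toNat := by
    unfold pvRot; rw [← List.rotate_eq_drop_append_take (by omega)]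
  rw [hx', hy']
  rcases Nat.lt_trichotomy x.toNat y.toNat with h | h | h
  · exact key _ _ h hy
  · exact absurd (by omega : x = y) hne
  · exact fun heq => key _ _ h hx heq.symm

theorem partA_spec (l : List Char) (pivot : Char) (depth : Nat) :
    ∀ (fuel : Nat) (a : List Int) (lt i gt : Nat),
    fuel ≥ gt + 1 - i → 1 ≤ i → lt < i → lt ≤ gt → gt < a.length →
    (∀ m, lt ≤ m → m < i → pvChr l (pvEnt a m + (depth : Int)) = pivot) →
    (partA l pivot depth fuel a lt i gt).1.length = a.length ∧
    (partA l pivot depth fuel a lt i gt).1.Perm a ∧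
    (∀ m, m < a.length → (m < lt ∨ gt < m) →
        pvEnt (partA l pivot depth fuel a lt i gt).1 m = pvEnt a m) ∧
    lt ≤ (partA l pivot depth fuel a lt i gt).2.1 ∧
    (partA l pivot depth fuel a lt i gt).2.1 ≤ (partA l pivot depth fuel a lt i gt).2.2 ∧
    (partA l pivot depth fuel a lt i gt).2.2 ≤ gt ∧
    (∀ m, lt ≤ m → m < (partA l pivot depth fuel a lt i gt).2.1 →
        pvChr l (pvEnt (partA l pivot depth fuel a lt i gt).1 m + (depth : Int)) < pivot) ∧
    (∀ m, (partA l pivot depth fuel a lt i gt).2.1 ≤ m → m ≤ (partA l pivot depth fuel a lt i gt).2.2 →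
        pvChr l (pvEnt (partA l pivot depth fuel a lt i gt).1 m + (depth : Int)) = pivot) ∧
    (∀ m, (partA l pivot depth fuel a lt i gt).2.2 < m → m ≤ gt →
        pivot < pvChr l (pvEnt (partA l pivot depth fuel a lt i gt).1 m + (depth : Int))) := by
  intro fuel
  induction fuel with
  | zero =>
    intro a lt i gt hf h1 hlt hle hglen h4
    exact ⟨rfl, List.Perm.refl _, fun m _ _ => rfl, le_refl _, hle, le_refl _,
      fun m hm1 hm2 => by have h2' : m < lt := hm2; omega,
      fun m hm1 hm2 => by have h2' : m ≤ gt := hm2; exact h4 m hm1 (by omega),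
      fun m hm1 hm2 => by have h1' : gt < m := hm1; omega⟩
  | succ fuel ih =>
    intro a lt i gt hf h1 hlt hle hglen h4
    simp only [partA]
    by_cases hig : i ≤ gt
    · rw [if_pos hig]
      have hilen : i < a.length := by omega
      have hltlen : lt < a.length := by omega
      by_cases hc1 : pvChr l (pvEnt a i + (depth : Int)) < pivot
      · rw [if_pos hc1]
        have hswlen : (pvSwap a lt i).length = a.length := length_pvSwap a lt i
        have hE := fun m => pvEnt_pvSwap a lt i m hltlen hilen
        have h4' : ∀ m, lt + 1 ≤ m → m < i + 1 →
            pvChr l (pvEnt (pvSwap a lt i) m + (depth : Int)) = pivot := by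
          intro m hm1 hm2
          rw [hE m]
          by_cases hmi : m = i
          · rw [if_pos hmi]; exact h4 lt (le_refl _) hlt
          · rw [if_neg hmi, if_neg (by omega)]
            exact h4 m (by omega) (by omega)
        obtain ⟨L, P, O, B1, B2, B3, R5, R6, R7⟩ :=
          ih (pvSwap a lt i) (lt+1) (i+1) gt (by omega) (by omega) (by omega) (by omega)
            (by rw [hswlen]; omega) h4'
        refine ⟨by rw [L, hswlen], P.trans (perm_pvSwap a lt i hltlen hilen), ?_,
          by omega, B2, B3, ?_, R6, R7⟩
        · intro m hm hcond
          rw [O m (by rw [hswlen]; omega) (by omega), hE m, if_neg (by omega), if_neg (by omega)]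
        · intro m hm1 hm2
          rcases Nat.lt_or_ge m (lt+1) with hm | hm
          · have hmlt : m = lt := by omega
            subst hmlt
            rw [O m (by rw [hswlen]; omega) (by omega), hE m, if_neg (by omega), if_pos rfl]
            exact hc1
          · exact R5 m hm hm2
      · rw [if_neg hc1]
        by_cases hc2 : pivot < pvChr l (pvEnt a i + (depth : Int))
        · rw [if_pos hc2]
          have hswlen : (pvSwap a gt i).length = a.length := length_pvSwap a gt i
          have hE := fun m => pvEnt_pvSwap a gt i m hglen hilen
          have h4' : ∀ m, lt ≤ m → m < i →
              pvChr l (pvEnt (pvSwap a gt i) m + (depth : Int)) = pivot := by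
            intro m hm1 hm2
            rw [hE m, if_neg (by omega), if_neg (by omega)]
            exact h4 m hm1 hm2
          obtain ⟨L, P, O, B1, B2, B3, R5, R6, R7⟩ :=
            ih (pvSwap a gt i) lt i (gt-1) (by omega) h1 hlt (by omega)
              (by rw [hswlen]; omega) h4'
          refine ⟨by rw [L, hswlen], P.trans (perm_pvSwap a gt i hglen hilen), ?_,
            B1, B2, by omega, R5, R6, ?_⟩
          · intro m hm hcond
            rw [O m (by rw [hswlen]; omega) (by omega), hE m, if_neg (by omega), if_neg (by omega)]
          · intro m hm1 hm2
            rcases Nat.lt_or_ge m gt with hm | hm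
            · exact R7 m hm1 (by omega)
            · have hmgt : m = gt := by omega
              subst hmgt
              rw [O m (by rw [hswlen]; omega) (by omega), hE m]
              by_cases hgi : m = i
              · rw [if_pos hgi]
                have : pvEnt a m = pvEnt a i := by rw [hgi]
                rw [← this] at hc2
                exact hc2
              · rw [if_neg hgi, if_pos rfl]
                exact hc2
        · rw [if_neg hc2]
          have hpiv : pvChr l (pvEnt a i + (depth : Int)) = pivot :=
            le_antisymm (not_lt.mp hc2) (not_lt.mp hc1)
          have h4' : ∀ m, lt ≤ m → m < i + 1 →
              pvChr l (pvEnt a m + (depth : Int)) = pivot := by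
            intro m hm1 hm2
            rcases Nat.lt_or_ge m i with hm | hm
            · exact h4 m hm1 hm
            · have : m = i := by omega
              subst this; exact hpiv
          exact ih a lt (i+1) gt (by omega) (by omega) (by omega) hle hglen h4'
    · rw [if_neg hig]
      exact ⟨rfl, List.Perm.refl _, fun m _ _ => rfl, le_refl _, hle, le_refl _,
        fun m hm1 hm2 => by have h2' : m < lt := hm2; omega,
        fun m hm1 hm2 => by have h2' : m ≤ gt := hm2; exact h4 m hm1 (by omega),
        fun m hm1 hm2 => by have h1' : gt < m := hm1; omega⟩

theorem sortA_guard (l : List Char) (fuel : Nat) (a : List Int) (lo hi depth : Nat)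
    (h : hi ≤ lo ∨ l.length ≤ depth) : sortA l fuel a lo hi depth = a := by
  cases fuel with
  | zero => rfl
  | succ fuel => simp only [sortA]; rw [if_pos h]

theorem sortA_spec (l : List Char) :
    ∀ (fuel : Nat) (a : List Int) (lo hi depth : Nat),
    fuel ≥ (l.length - depth) + (hi + 1 - lo) → a.length = l.length → hi < a.length →
    pvGood l a →
    (∀ x y, x ∈ pvWin a lo hi → y ∈ pvWin a lo hi → pvAgree l depth x y) →
    (sortA l fuel a lo hi depth).length = a.length ∧
    (sortA l fuel a lo hi depth).Perm a ∧
    (∀ m, m < a.length → (m < lo ∨ hi < m) → pvEnt (sortA l fuel a lo hi depth) m = pvEnt a m) ∧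
    (∀ p q, lo ≤ p → p ≤ q → q ≤ hi →
        pvRot l (pvEnt (sortA l fuel a lo hi depth) p) ≤ pvRot l (pvEnt (sortA l fuel a lo hi depth) q)) := by
  intro fuel
  induction fuel with
  | zero =>
    intro a lo hi depth hf hlen hhi hg hag
    exact ⟨rfl, List.Perm.refl _, fun m _ _ => rfl, fun p q h1 h2 h3 => by omega⟩
  | succ fuel ih =>
    intro a lo hi depth hf hlen hhi hg hag
    have hent_mem : ∀ (b : List Int) (m : Nat), m < b.length → pvEnt b m ∈ b :=
      fun b m hm => by rw [pvEnt_eq_getElem b m hm]; exact List.getElem_mem hm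
    by_cases hguard : hi ≤ lo ∨ l.length ≤ depth
    · have hr : sortA l (fuel+1) a lo hi depth = a := sortA_guard l (fuel+1) a lo hi depth hguard
      rw [hr]
      refine ⟨rfl, List.Perm.refl _, fun m _ _ => rfl, ?_⟩
      intro p q h1 h2 h3
      rcases hguard with hg1 | hg2
      · have hpq : p = q := by omega
        subst hpq; exact le_refl _
      · have hxm : pvEnt a p ∈ pvWin a lo hi := (mem_pvWin a lo hi _).mpr ⟨p, h1, by omega, by omega, rfl⟩
        have hym : pvEnt a q ∈ pvWin a lo hi := (mem_pvWin a lo hi _).mpr ⟨q, by omega, h3, by omega, rfl⟩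
        have hagr := hag _ _ hxm hym
        obtain ⟨hx0, hxn⟩ := hg _ (hent_mem a p (by omega))
        obtain ⟨hy0, hyn⟩ := hg _ (hent_mem a q (by omega))
        exact le_of_eq (pvRot_eq_of_agree l _ _ hxn hyn (fun e he => hagr e (by omega)))
    · have hlohi : lo < hi := by omega
      have hdep : depth < l.length := by
        rcases Nat.lt_or_ge depth l.length with h | h
        · exact h
        · exact absurd (Or.inr h) hguard
      have hn : 0 < l.length := by omega
      have hbr : ∀ (x : Int), 0 ≤ x → pvChr l (x + (depth : Int)) = pvC l x depth :=
        fun x hx => pvChr_eq_pvC l x depth hn hx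
      have hgood_mem : ∀ (b : List Int), b.Perm a → pvGood l b :=
        fun b hb x hx => hg x (hb.subset hx)
      -- the partition
      have h4fact : ∀ m, lo ≤ m → m < lo + 1 →
          pvChr l (pvEnt a m + (depth : Int)) = pvChr l (pvEnt a lo + (depth : Int)) := by
        intro m hm1 hm2
        have : m = lo := by omega
        subst this; rfl
      obtain ⟨L, P, O, B1, B2, B3, R5, R6, R7⟩ :=
        partA_spec l (pvChr l (pvEnt a lo + (depth : Int))) depth (hi - lo) a lo (lo+1) hi
          (by omega) (by omega) (by omega) (by omega) (by omega) h4fact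
      set pivot := pvChr l (pvEnt a lo + (depth : Int)) with hpivdef
      set A1 := (partA l pivot depth (hi - lo) a lo (lo+1) hi).1 with hA1def
      set LT := (partA l pivot depth (hi - lo) a lo (lo+1) hi).2.1 with hLTdef
      set GT := (partA l pivot depth (hi - lo) a lo (lo+1) hi).2.2 with hGTdef
      have hstep : sortA l (fuel+1) a lo hi depth =
          sortA l fuel (sortA l fuel (sortA l fuel A1 lo (LT-1) depth) LT GT (depth+1)) (GT+1) hi depth := by
        simp only [sortA]
        rw [if_neg hguard]
      rw [hstep]
      have wpA : (pvWin A1 lo hi).Perm (pvWin a lo hi) :=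
        pvWin_perm a A1 lo hi L P O
      -- first recursive call
      obtain ⟨L1, P1, O1, S1⟩ :=
        ih A1 lo (LT-1) depth (by omega) (by omega) (by omega) (hgood_mem A1 P)
          (by
            intro x y hx hy
            have hsub1 : ∀ z, z ∈ pvWin A1 lo (LT-1) → z ∈ pvWin A1 lo hi := by
              intro z hz
              rw [mem_pvWin] at hz ⊢
              obtain ⟨m, hm1, hm2, hm3, hm4⟩ := hz
              exact ⟨m, hm1, by omega, hm3, hm4⟩
            exact hag x y (wpA.subset (hsub1 x hx)) (wpA.subset (hsub1 y hy)))
      set a3 := sortA l fuel A1 lo (LT-1) depth with ha3def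
      have la1 : A1.length = a.length := L
      have la3 : a3.length = a.length := by rw [L1, la1]
      -- entries of a3 at positions ≥ LT are those of A1
      have hE1 : ∀ m, m < a.length → LT ≤ m → pvEnt a3 m = pvEnt A1 m := by
        intro m hm hLTm
        rcases Nat.eq_zero_or_pos LT with h0 | h1
        · rw [ha3def, sortA_guard l fuel A1 lo (LT-1) depth (Or.inl (by omega))]
        · exact O1 m (by omega) (Or.inr (by omega))
      have wp3 : (pvWin a3 lo hi).Perm (pvWin A1 lo hi) :=
        pvWin_perm A1 a3 lo hi L1 P1 (fun m hm hc => O1 m hm (by omega))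
      -- region facts on a3
      have hR5_3 : ∀ m, lo ≤ m → m < LT → pvChr l (pvEnt a3 m + (depth : Int)) < pivot := by
        intro m hm1 hm2
        have wr : (pvWin a3 lo (LT-1)).Perm (pvWin A1 lo (LT-1)) :=
          pvWin_perm A1 a3 lo (LT-1) L1 P1 O1
        have hx : pvEnt a3 m ∈ pvWin a3 lo (LT-1) :=
          (mem_pvWin _ _ _ _).mpr ⟨m, hm1, by omega, by omega, rfl⟩
        obtain ⟨m', hm'1, hm'2, hm'3, hm'4⟩ := (mem_pvWin _ _ _ _).mp (wr.subset hx)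
        rw [hm'4]
        exact R5 m' hm'1 (by omega)
      have hR6_3 : ∀ m, LT ≤ m → m ≤ GT → pvChr l (pvEnt a3 m + (depth : Int)) = pivot := by
        intro m hm1 hm2
        rw [hE1 m (by omega) hm1]
        exact R6 m hm1 hm2
      have hR7_3 : ∀ m, GT < m → m ≤ hi → pivot < pvChr l (pvEnt a3 m + (depth : Int)) := by
        intro m hm1 hm2
        rw [hE1 m (by omega) (by omega)]
        exact R7 m hm1 hm2
      -- second recursive call
      obtain ⟨L2, P2, O2, S2⟩ :=
        ih a3 LT GT (depth+1) (by omega) (by omega) (by omega)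
          (hgood_mem a3 (P1.trans P))
          (by
            intro x y hx hy
            have hmem : ∀ z, z ∈ pvWin a3 LT GT →
                z ∈ pvWin a lo hi ∧ pvChr l (z + (depth : Int)) = pivot ∧ z ∈ a3 := by
              intro z hz
              obtain ⟨m, hm1, hm2, hm3, hm4⟩ := (mem_pvWin _ _ _ _).mp hz
              refine ⟨(wp3.trans wpA).subset ((mem_pvWin _ _ _ _).mpr ⟨m, by omega, by omega, hm3, hm4⟩), ?_, ?_⟩
              · rw [hm4]; exact hR6_3 m hm1 hm2
              · rw [hm4]; exact hent_mem a3 m hm3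
            obtain ⟨hxw, hxv, hxa⟩ := hmem x hx
            obtain ⟨hyw, hyv, hya⟩ := hmem y hy
            have hbase := hag x y hxw hyw
            obtain ⟨hx0, hxn⟩ := hgood_mem a3 (P1.trans P) x hxa
            obtain ⟨hy0, hyn⟩ := hgood_mem a3 (P1.trans P) y hya
            intro e he
            rcases Nat.lt_or_ge e depth with h | h
            · exact hbase e h
            · have he' : e = depth := by omega
              subst he'
              rw [← hbr x hx0, ← hbr y hy0, hxv, hyv])
      set a4 := sortA l fuel a3 LT GT (depth+1) with ha4def
      have la4 : a4.length = a.length := by rw [L2, la3]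
      have wp4 : (pvWin a4 lo hi).Perm (pvWin a3 lo hi) :=
        pvWin_perm a3 a4 lo hi L2 P2 (fun m hm hc => O2 m hm (by omega))
      -- third recursive call
      obtain ⟨L3, P3, O3, S3⟩ :=
        ih a4 (GT+1) hi depth (by omega) (by omega) (by omega)
          (hgood_mem a4 (P2.trans (P1.trans P)))
          (by
            intro x y hx hy
            have hmem : ∀ z, z ∈ pvWin a4 (GT+1) hi → z ∈ pvWin a lo hi := by
              intro z hz
              obtain ⟨m, hm1, hm2, hm3, hm4⟩ := (mem_pvWin _ _ _ _).mp hz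
              exact ((wp4.trans (wp3.trans wpA))).subset
                ((mem_pvWin _ _ _ _).mpr ⟨m, by omega, hm2, hm3, hm4⟩)
            exact hag x y (hmem x hx) (hmem y hy))
      set a5 := sortA l fuel a4 (GT+1) hi depth with ha5def
      have la5 : a5.length = a.length := by rw [L3, la4]
      have wp5 : (pvWin a5 lo hi).Perm (pvWin a4 lo hi) :=
        pvWin_perm a4 a5 lo hi L3 P3 (fun m hm hc => O3 m hm (by omega))
      have wpAll : (pvWin a5 lo hi).Perm (pvWin a lo hi) :=
        wp5.trans (wp4.trans (wp3.trans wpA))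
      have hperm5 : a5.Perm a := P3.trans (P2.trans (P1.trans P))
      have hga5 : pvGood l a5 := hgood_mem a5 hperm5
      -- entries of a5 by region
      have hE_1 : ∀ m, lo ≤ m → m < LT → pvEnt a5 m = pvEnt a3 m := by
        intro m hm1 hm2
        rw [O3 m (by omega) (Or.inl (by omega)), O2 m (by omega) (Or.inl (by omega))]
      have hE_2 : ∀ m, LT ≤ m → m ≤ GT → pvEnt a5 m = pvEnt a4 m := by
        intro m hm1 hm2
        rw [O3 m (by omega) (Or.inl (by omega))]
      -- char-at-depth facts per region, on a5
      have F1 : ∀ m, lo ≤ m → m < LT → pvChr l (pvEnt a5 m + (depth : Int)) < pivot := by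
        intro m hm1 hm2
        rw [hE_1 m hm1 hm2]
        exact hR5_3 m hm1 hm2
      have F2 : ∀ m, LT ≤ m → m ≤ GT → pvChr l (pvEnt a5 m + (depth : Int)) = pivot := by
        intro m hm1 hm2
        rw [hE_2 m hm1 hm2]
        have wr : (pvWin a4 LT GT).Perm (pvWin a3 LT GT) :=
          pvWin_perm a3 a4 LT GT L2 P2 O2
        have hx : pvEnt a4 m ∈ pvWin a4 LT GT :=
          (mem_pvWin _ _ _ _).mpr ⟨m, hm1, hm2, by omega, rfl⟩
        obtain ⟨m', hm'1, hm'2, hm'3, hm'4⟩ := (mem_pvWin _ _ _ _).mp (wr.subset hx)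
        rw [hm'4]
        exact hR6_3 m' hm'1 hm'2
      have F3 : ∀ m, GT < m → m ≤ hi → pivot < pvChr l (pvEnt a5 m + (depth : Int)) := by
        intro m hm1 hm2
        have wr : (pvWin a5 (GT+1) hi).Perm (pvWin a4 (GT+1) hi) :=
          pvWin_perm a4 a5 (GT+1) hi L3 P3 O3
        have hx : pvEnt a5 m ∈ pvWin a5 (GT+1) hi :=
          (mem_pvWin _ _ _ _).mpr ⟨m, by omega, hm2, by omega, rfl⟩
        obtain ⟨m', hm'1, hm'2, hm'3, hm'4⟩ := (mem_pvWin _ _ _ _).mp (wr.subset hx)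
        rw [hm'4, O2 m' (by omega) (Or.inr (by omega))]
        rw [hE1 m' (by omega) (by omega)] at *
        exact R7 m' (by omega) hm'2
      -- cross-region strict comparison
      have hcross : ∀ pp qq, lo ≤ pp → pp ≤ hi → lo ≤ qq → qq ≤ hi →
          pvChr l (pvEnt a5 pp + (depth : Int)) < pvChr l (pvEnt a5 qq + (depth : Int)) →
          pvRot l (pvEnt a5 pp) < pvRot l (pvEnt a5 qq) := by
        intro pp qq h1 h2 h3 h4 hlt
        have hxm : pvEnt a5 pp ∈ pvWin a lo hi :=
          wpAll.subset ((mem_pvWin _ _ _ _).mpr ⟨pp, h1, h2, by omega, rfl⟩)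
        have hym : pvEnt a5 qq ∈ pvWin a lo hi :=
          wpAll.subset ((mem_pvWin _ _ _ _).mpr ⟨qq, h3, h4, by omega, rfl⟩)
        have hagr := hag _ _ hxm hym
        obtain ⟨hx0, hxn⟩ := hga5 _ (hent_mem a5 pp (by omega))
        obtain ⟨hy0, hyn⟩ := hga5 _ (hent_mem a5 qq (by omega))
        rw [hbr _ hx0, hbr _ hy0] at hlt
        exact pvRot_lt l _ _ depth hdep hxn hyn hagr hlt
      refine ⟨by omega, hperm5, ?_, ?_⟩
      · -- untouched outside [lo, hi]
        intro m hm hc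
        rw [O3 m (by omega) (by omega), O2 m (by omega) (by omega),
          O1 m (by omega) (by omega), O m (by omega) (by omega)]
      · -- sortedness
        intro p q hp hpq hq
        by_cases h1p : p < LT
        · by_cases h1q : q < LT
          · rw [hE_1 p hp h1p, hE_1 q (by omega) h1q]
            exact S1 p q hp hpq (by omega)
          · rcases Nat.lt_or_ge GT q with h2q | h2q
            · exact le_of_lt (hcross p q hp (by omega) (by omega) hq
                (lt_trans (F1 p hp h1p) (F3 q h2q hq)))
            · exact le_of_lt (hcross p q hp (by omega) (by omega) hq (by rw [F2 q (by omega) h2q]; exact F1 p hp h1p))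
        · by_cases h2p : p ≤ GT
          · by_cases h2q : q ≤ GT
            · rw [hE_2 p (by omega) h2p, hE_2 q (by omega) h2q]
              exact S2 p q (by omega) hpq h2q
            · exact le_of_lt (hcross p q hp (by omega) (by omega) hq
                (by rw [F2 p (by omega) h2p]; exact F3 q (by omega) hq))
          · exact S3 p q (by omega) hpq hq

theorem pvKey_eq_pvRot (l : List Char) (x : Int) (hx : 0 ≤ x) :
    PySem.Chars.slice l (some x) none ++ PySem.Chars.slice l none (some x) = pvRot l x := by
  rw [PySem.Chars.slice_eq_listSlice, PySem.Chars.slice_eq_listSlice,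
    PySem.List.slice_from _ hx, PySem.List.slice_to _ hx]
  rfl

-- ===== VERDICT (by name: the statement is the Claim_ definition above) =====
theorem circular_suffix_array_spec : Claim_equal_circular_suffix_array := by
  unfold Claim_equal_circular_suffix_array
  intro s _hdom hpre
  unfold Spec_circular_suffix_array
  have hY : circular_suffix_array s =
      sortA s.toList (2 * s.toList.length + 2)
        (PySem.List.pyRange 0 (s.toList.length : Int) 1) 0 (s.toList.length - 1) 0 := rfl
  by_cases hn : s.toList.length = 0
  · have hnil : PySem.List.pyRange 0 (s.toList.length : Int) 1 = [] :=
      PySem.List.pyRange_one_eq_nil (by rw [hn]; simp)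
    rw [hY, sortA_guard s.toList _ _ 0 (s.toList.length - 1) 0 (Or.inl (by omega)), hnil]
    unfold circular_suffix_array_alt
    rw [hnil]
    exact ((PySem.List.sorted_eq_nil_iff _ _ _).mpr rfl).symm
  · have hlen : (PySem.List.pyRange 0 (s.toList.length : Int) 1).length = s.toList.length := by
      rw [PySem.List.length_pyRange_one]; omega
    have hgood : pvGood s.toList (PySem.List.pyRange 0 (s.toList.length : Int) 1) := by
      intro x hx
      rw [PySem.List.mem_pyRange_one] at hx
      constructor
      · exact hx.1
      · omega
    obtain ⟨Lf, Pf, Of, Sf⟩ :=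
      sortA_spec s.toList (2 * s.toList.length + 2)
        (PySem.List.pyRange 0 (s.toList.length : Int) 1) 0 (s.toList.length - 1) 0
        (by omega) (by omega) (by omega) hgood
        (fun x y _ _ e he => absurd he (by omega))
    rw [← hY] at Lf Pf Sf
    have hylen : (circular_suffix_array s).length = s.toList.length := by rw [Lf, hlen]
    have hgoodY : pvGood s.toList (circular_suffix_array s) :=
      fun x hx => hgood x (Pf.subset hx)
    have hnodupY : (circular_suffix_array s).Nodup :=
      Pf.nodup_iff.mpr (PySem.List.nodup_pyRange_one _ _)
    have hpair : List.Pairwise (fun a b =>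
        (PySem.Chars.slice s.toList (some a) none ++ PySem.Chars.slice s.toList none (some a)) <
        (PySem.Chars.slice s.toList (some b) none ++ PySem.Chars.slice s.toList none (some b)))
        (circular_suffix_array s) := by
      rw [List.pairwise_iff_getElem]
      intro i j hi hj hij
      obtain ⟨hx0, hxn⟩ := hgoodY _ (List.getElem_mem hi)
      obtain ⟨hy0, hyn⟩ := hgoodY _ (List.getElem_mem hj)
      rw [pvKey_eq_pvRot s.toList _ hx0, pvKey_eq_pvRot s.toList _ hy0]
      have hle := Sf i j (by omega) (by omega) (by omega)
      rw [pvEnt_eq_getElem _ i hi, pvEnt_eq_getElem _ j hj] at hle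
      have hne : (circular_suffix_array s)[i] ≠ (circular_suffix_array s)[j] := by
        intro heq
        exact absurd (hnodupY.getElem_inj_iff.mp heq) (by omega)
      exact lt_of_le_of_ne hle
        (pvRot_inj s.toList hpre _ _ hx0 hxn hy0 hyn hne)
    -- the library-order instances on List Char (core vs Mathlib's LinearOrder) decide the same
    -- relation; bridge them by congruence
    have hbridge : circular_suffix_array_alt s =
        @PySem.List.sorted Int (List Char) List.instLinearOrder.toLT LinearOrder.toDecidableLT
          (PySem.List.pyRange 0 (s.toList.length : Int) 1)
          (fun i => PySem.Chars.slice s.toList (some i) none ++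
                    PySem.Chars.slice s.toList none (some i)) false := by
      unfold circular_suffix_array_alt
      congr 1
    exact ((PySem.List.sorted_eq_of_perm_of_pairwise_lt _ _ _ Pf hpair).symm).trans hbridge.symm
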